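-- pv_equiv track=rewrite | github.com/markjosims/FLExEntry | ReadNadebFlex.py | get_definition
-- ===== SOURCE A (Python) =====
-- def_flags = ('\\g_Eng', '\\g_Por', '\\d_Eng', '\\d_Por', '\\re_Eng', '\\re_Por',
--              '\\su_Por')
--
-- def_langs = ('(eng)', '(por)', '(eng)', '(por)', '(eng)', '(por)',
--              '(por)')
--
-- month_abrevs = ('jan', 'feb', 'mar', 'apr', 'may', 'jun',\
--                 'jul', 'aug', 'sep', 'oct', 'nov', 'dec')
--
-- month_index = tuple(str(i) for i in range(1,13))
--
-- def get_definition(fields):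
--     date = fields['\dt'].lower()
--     for ma, mi in zip(month_abrevs, month_index):
--         date=date.replace(ma, mi)
--     for flag, lang in  zip(def_flags, def_langs):
--         # prioritize Eng gloss, then Eng def, then Port def
--         if flag in fields.keys():
--             if fields[flag] == '?':
--                 continue # don't include blank definitions
--             return fields[flag] +' '+ lang + '\\;' + date
-- ===== SOURCE B (Python) =====
-- def_flags = ('\\g_Eng', '\\g_Por', '\\d_Eng', '\\d_Por', '\\re_Eng', '\\re_Por',
--              '\\su_Por')
--
-- def_langs = ('(eng)', '(por)', '(eng)', '(por)', '(eng)', '(por)',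
--              '(por)')
--
-- month_abrevs = ('jan', 'feb', 'mar', 'apr', 'may', 'jun',
--                 'jul', 'aug', 'sep', 'oct', 'nov', 'dec')
--
-- month_map = {ma: str(i) for i, ma in enumerate(month_abrevs, start=1)}
--
--
-- def get_definition(fields):
--     # one table-driven left-to-right pass instead of twelve full-string replaces
--     src = fields['\dt'].lower()
--     out = []
--     i = 0
--     while i < len(src):
--         digits = month_map.get(src[i:i + 3])
--         if digits is not None:
--             out.append(digits)
--             i += 3
--         else:
--             out.append(src[i])
--             i += 1
--     date = ''.join(out)
--     cand = next((fields[flag] + ' ' + lang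
--                  for flag, lang in zip(def_flags, def_langs)
--                  if flag in fields and fields[flag] != '?'), None)
--     return None if cand is None else cand + '\\;' + date
-- ===== Notes on version B (the rewrite author's own statement) =====
-- stated objective: idiomatic
-- what changed: The twelve sequential full-string str.replace passes over the date become a single table-driven left-to-right scan (dict lookup of each 3-char window), and the if/continue/return priority loop becomes a next() over a filtered generator.
import Mathlib
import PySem

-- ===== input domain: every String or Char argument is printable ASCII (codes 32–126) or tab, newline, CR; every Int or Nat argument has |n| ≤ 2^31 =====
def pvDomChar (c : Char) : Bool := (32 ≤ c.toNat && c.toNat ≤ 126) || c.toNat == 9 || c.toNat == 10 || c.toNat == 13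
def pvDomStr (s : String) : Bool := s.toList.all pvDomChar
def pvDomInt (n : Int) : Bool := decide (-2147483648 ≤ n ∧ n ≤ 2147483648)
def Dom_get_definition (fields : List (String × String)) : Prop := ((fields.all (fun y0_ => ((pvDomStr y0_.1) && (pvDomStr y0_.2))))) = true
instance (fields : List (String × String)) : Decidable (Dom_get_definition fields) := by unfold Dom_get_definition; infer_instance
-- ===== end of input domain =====

-- B replaces A's twelve sequential full-string replaces by one table-driven left-to-right
-- scan and A's if/continue/return priority loop by a first-match search (objective: idiomatic).

-- ===== PORT A =====
def defFlagLangs : List (String × String) :=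
  [("\\g_Eng", "(eng)"), ("\\g_Por", "(por)"), ("\\d_Eng", "(eng)"), ("\\d_Por", "(por)"),
   ("\\re_Eng", "(eng)"), ("\\re_Por", "(por)"), ("\\su_Por", "(por)")]

def monthPairs : List (String × String) :=
  [("jan", "1"), ("feb", "2"), ("mar", "3"), ("apr", "4"), ("may", "5"), ("jun", "6"),
   ("jul", "7"), ("aug", "8"), ("sep", "9"), ("oct", "10"), ("nov", "11"), ("dec", "12")]

def defLoopA (d : PySem.Dict String String) (date : String) : List (String × String) → Option String
  | [] => none
  | (flag, lang) :: rest =>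
    if d.contains flag then
      match d.get? flag with
      | some v => if v = "?" then defLoopA d date rest
                  else some (v ++ " " ++ lang ++ "\\;" ++ date)
      | none => none  -- unreachable: contains flag = true
    else defLoopA d date rest

def get_definition (fields : List (String × String)) : Option String :=
  match (PySem.Dict.mk fields).get? "\\dt" with
  | none => none  -- Python raises KeyError here; excluded by Pre_
  | some dt =>
    let date := monthPairs.foldl (fun s p => PySem.Str.replace s p.1 p.2) (PySem.Str.lower dt)
    defLoopA (PySem.Dict.mk fields) date defFlagLangs

-- ===== PORT B =====
-- month_map of Source B, on code points
def monthTable : List (List Char × List Char) :=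
  [(['j','a','n'], ['1']), (['f','e','b'], ['2']), (['m','a','r'], ['3']), (['a','p','r'], ['4']),
   (['m','a','y'], ['5']), (['j','u','n'], ['6']), (['j','u','l'], ['7']), (['a','u','g'], ['8']),
   (['s','e','p'], ['9']), (['o','c','t'], ['1','0']), (['n','o','v'], ['1','1']), (['d','e','c'], ['1','2'])]

-- the while loop of Source B: look the 3-char window up, emit digits and skip 3, else emit the char
def subMonths : List Char → List Char
  | c1 :: c2 :: c3 :: rest =>
    match List.lookup [c1, c2, c3] monthTable with
    | some ds => ds ++ subMonths rest
    | none => c1 :: subMonths (c2 :: c3 :: rest)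
  | c :: rest => c :: subMonths rest
  | [] => []

def get_definition_alt (fields : List (String × String)) : Option String :=
  match (PySem.Dict.mk fields).get? "\\dt" with
  | none => none  -- KeyError; excluded by Pre_
  | some src =>
    let date := String.ofList (subMonths (PySem.Str.lower src).toList)
    match defFlagLangs.findSome? (fun p =>
        match (PySem.Dict.mk fields).get? p.1 with
        | some v => if v = "?" then none else some (v ++ " " ++ p.2)
        | none => none) with
    | none => none
    | some c => some (c ++ "\\;" ++ date)

-- ===== PRECONDITION & SPEC =====
-- Pre_ excludes exactly the inputs without a '\dt' key, on which Python A raises KeyError.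
def Pre_get_definition (fields : List (String × String)) : Prop :=
  (PySem.Dict.mk fields).contains "\\dt" = true
instance (fields : List (String × String)) : Decidable (Pre_get_definition fields) := by
  unfold Pre_get_definition; infer_instance

def pvWitness_get_definition : (List (String × String)) :=
  [("\\dt", "3 jan 2020"), ("\\g_Eng", "dog")]

def Spec_get_definition (fields : List (String × String)) (out : Option String) : Prop := out = get_definition_alt fields
instance (fields : List (String × String)) (out : Option String) : Decidable (Spec_get_definition fields out) := by unfold Spec_get_definition; infer_instance

-- ===== CLAIM (what is proved, stated in full; the proofs are below) =====
def Claim_equal_get_definition : Prop := ∀ (fields : List (String × String)), Dom_get_definition fields → Pre_get_definition fields → Spec_get_definition fields (get_definition fields)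

-- ===== LEMMAS AND PROOFS =====

-- unfolding lemmas for PySem.Chars.replace.go
theorem go_zero (old new l acc : List Char) :
    PySem.Chars.replace.go old new 0 l acc = acc.reverse ++ l := by
  rw [PySem.Chars.replace.go.eq_def]

theorem go_nil (old new : List Char) (f : Nat) (acc : List Char) :
    PySem.Chars.replace.go old new (f + 1) [] acc = acc.reverse := by
  rw [PySem.Chars.replace.go.eq_def]

theorem go_cons (old new : List Char) (f : Nat) (c : Char) (t acc : List Char) :
    PySem.Chars.replace.go old new (f + 1) (c :: t) acc =
      if old.isPrefixOf (c :: t) then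
        PySem.Chars.replace.go old new f ((c :: t).drop old.length) (new.reverse ++ acc)
      else PySem.Chars.replace.go old new f t (c :: acc) := by
  rw [PySem.Chars.replace.go.eq_def]

theorem go_acc (old new : List Char) :
    ∀ (f : Nat) (l acc : List Char),
      PySem.Chars.replace.go old new f l acc = acc.reverse ++ PySem.Chars.replace.go old new f l [] := by
  intro f
  induction f with
  | zero => intro l acc; rw [go_zero, go_zero]; simp
  | succ f ih =>
    intro l acc
    cases l with
    | nil => rw [go_nil, go_nil]; simp
    | cons c t =>
      rw [go_cons, go_cons]
      split_ifs with h
      · rw [ih _ (new.reverse ++ acc), ih _ (new.reverse ++ [])]; simp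
      · rw [ih t (c :: acc), ih t [c]]; simp

theorem go_congr (old new : List Char) (hold : old ≠ []) :
    ∀ (f1 : Nat) {f2 : Nat} {l : List Char}, l.length ≤ f1 → l.length ≤ f2 →
      PySem.Chars.replace.go old new f1 l [] = PySem.Chars.replace.go old new f2 l [] := by
  have holdlen : 0 < old.length := List.length_pos_iff.mpr hold
  intro f1
  induction f1 with
  | zero =>
    intro f2 l h1 _
    have hl : l = [] := List.eq_nil_of_length_eq_zero (by omega)
    subst hl
    cases f2 with
    | zero => rfl
    | succ f2' => rw [go_zero, go_nil]; simp
  | succ f ih =>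
    intro f2 l h1 h2
    cases l with
    | nil =>
      cases f2 with
      | zero => rw [go_zero, go_nil]; simp
      | succ f2' => rw [go_nil, go_nil]
    | cons c t =>
      cases f2 with
      | zero => simp at h2
      | succ f2' =>
        rw [go_cons, go_cons]
        split_ifs with h
        · have hlen : ((c :: t).drop old.length).length ≤ f := by
            rw [List.length_drop]; simp at h1 ⊢; omega
          have hlen2 : ((c :: t).drop old.length).length ≤ f2' := by
            rw [List.length_drop]; simp at h2 ⊢; omega
          rw [go_acc old new f _ (new.reverse ++ []), go_acc old new f2' _ (new.reverse ++ []),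
            ih hlen hlen2]
        · have hlen : t.length ≤ f := by simp at h1; omega
          have hlen2 : t.length ≤ f2' := by simp at h2; omega
          rw [go_acc old new f t [c], go_acc old new f2' t [c], ih hlen hlen2]

theorem replace_nil' (old new : List Char) (h : old ≠ []) :
    PySem.Chars.replace [] old new = [] := by
  rw [PySem.Chars.replace, if_neg (by simpa using h)]
  rw [show ([] : List Char).length = 0 from rfl, go_zero]; simp

theorem replace_pos (old new : List Char) (c : Char) (t : List Char) (hold : old ≠ [])
    (hp : old <+: (c :: t)) :
    PySem.Chars.replace (c :: t) old new =
      new ++ PySem.Chars.replace ((c :: t).drop old.length) old new := by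
  have holdlen : 0 < old.length := List.length_pos_iff.mpr hold
  rw [PySem.Chars.replace, PySem.Chars.replace, if_neg (by simpa using hold),
    if_neg (by simpa using hold)]
  rw [show (c :: t).length = t.length + 1 from rfl, go_cons,
    if_pos (List.isPrefixOf_iff_prefix.mpr hp)]
  rw [go_acc]
  have hlen : ((c :: t).drop old.length).length ≤ t.length := by
    rw [List.length_drop]; simp; omega
  rw [go_congr old new hold t.length hlen (le_refl _)]
  simp

theorem replace_neg (old new : List Char) (c : Char) (t : List Char) (hold : old ≠ [])
    (hp : ¬ old <+: (c :: t)) :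
    PySem.Chars.replace (c :: t) old new = c :: PySem.Chars.replace t old new := by
  rw [PySem.Chars.replace, PySem.Chars.replace, if_neg (by simpa using hold),
    if_neg (by simpa using hold)]
  rw [show (c :: t).length = t.length + 1 from rfl, go_cons,
    if_neg (by simpa [List.isPrefixOf_iff_prefix] using hp)]
  rw [go_acc]
  simp

-- a pattern has no full or partial occurrence anchored inside a
def noHitsB (m a : List Char) : Bool :=
  (List.range a.length).all (fun j => !(m.isPrefixOf (a.drop j) || (a.drop j).isPrefixOf m))

theorem prefix_append_cases (m r u : List Char) (h : m <+: r ++ u) : m <+: r ∨ r <+: m := by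
  by_cases hl : m.length ≤ r.length
  · left; exact (List.isPrefix_append_of_length hl).mp h
  · right
    exact List.prefix_of_prefix_length_le (r.prefix_append u) h (by omega)

theorem no_prefix_of_noHits (m a u : List Char) (h : noHitsB m a = true) {j : Nat}
    (hj : j < a.length) : ¬ m <+: (a.drop j ++ u) := by
  intro hpre
  unfold noHitsB at h
  have hj' := List.all_eq_true.mp h j (List.mem_range.mpr hj)
  simp only [Bool.not_eq_true', Bool.or_eq_false_iff] at hj'
  rcases prefix_append_cases m (a.drop j) u hpre with h1 | h2
  · rw [← List.isPrefixOf_iff_prefix] at h1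
    rw [hj'.1] at h1
    exact Bool.false_ne_true h1
  · rw [← List.isPrefixOf_iff_prefix] at h2
    rw [hj'.2] at h2
    exact Bool.false_ne_true h2

theorem noHitsB_tail (m : List Char) (c : Char) (a : List Char) (h : noHitsB m (c :: a) = true) :
    noHitsB m a = true := by
  simp only [noHitsB, List.all_eq_true, List.mem_range] at h ⊢
  intro j hj
  have := h (j + 1) (by simp; omega)
  simpa [List.drop_succ_cons] using this

theorem replace_append (m d : List Char) (hm : m ≠ []) :
    ∀ (a u : List Char), noHitsB m a = true →
      PySem.Chars.replace (a ++ u) m d = a ++ PySem.Chars.replace u m d := by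
  intro a
  induction a with
  | nil => intro u _; simp
  | cons c a' ih =>
    intro u h
    have h0 : ¬ m <+: (c :: (a' ++ u)) := by
      have := no_prefix_of_noHits m (c :: a') u h (j := 0) (by simp)
      simpa using this
    rw [List.cons_append, replace_neg m d c (a' ++ u) hm h0, ih u (noHitsB_tail m c a' h)]
    rfl

def stepR (s : List Char) (p : List Char × List Char) : List Char :=
  PySem.Chars.replace s p.1 p.2

theorem foldl_append_pass (Q : List (List Char × List Char)) (a : List Char)
    (hQ : ∀ p ∈ Q, p.1 ≠ [] ∧ noHitsB p.1 a = true) :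
    ∀ u, Q.foldl stepR (a ++ u) = a ++ Q.foldl stepR u := by
  induction Q with
  | nil => intro u; simp
  | cons p Q' ih =>
    intro u
    have hp := hQ p (List.mem_cons_self ..)
    simp only [List.foldl_cons]
    rw [show stepR (a ++ u) p = a ++ stepR u p from replace_append p.1 p.2 hp.1 a u hp.2]
    exact ih (fun q hq => hQ q (List.mem_cons_of_mem _ hq)) (stepR u p)

theorem single_prefix_replace {e : Char} {m d t : List Char} (hm : m ≠ []) (hd : d ≠ [])
    (he : e ∉ d) (h : [e] <+: PySem.Chars.replace t m d) : [e] <+: t := by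
  cases t with
  | nil => rw [replace_nil' m d hm] at h; simp at h
  | cons c t' =>
    by_cases hp : m <+: (c :: t')
    · rw [replace_pos m d c t' hm hp] at h
      cases d with
      | nil => exact absurd rfl hd
      | cons d0 d' =>
        rw [List.cons_append] at h
        rw [List.cons_prefix_cons] at h
        exact absurd (show e ∈ d0 :: d' from by rw [h.1]; exact List.mem_cons_self ..) he
    · rw [replace_neg m d c t' hm hp] at h
      rw [List.cons_prefix_cons] at h
      simp [List.cons_prefix_cons, h.1]

theorem double_prefix_replace {b e : Char} {m d t : List Char} (hm : m ≠ []) (hd : d ≠ [])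
    (hb : b ∉ d) (he : e ∉ d) (h : [b, e] <+: PySem.Chars.replace t m d) : [b, e] <+: t := by
  cases t with
  | nil => rw [replace_nil' m d hm] at h; simp at h
  | cons c t' =>
    by_cases hp : m <+: (c :: t')
    · rw [replace_pos m d c t' hm hp] at h
      cases d with
      | nil => exact absurd rfl hd
      | cons d0 d' =>
        rw [List.cons_append, List.cons_prefix_cons] at h
        exact absurd (show b ∈ d0 :: d' from by rw [h.1]; exact List.mem_cons_self ..) hb
    · rw [replace_neg m d c t' hm hp] at h
      rw [List.cons_prefix_cons] at h
      rw [List.cons_prefix_cons]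
      exact ⟨h.1, single_prefix_replace hm hd he h.2⟩

theorem not_prefix_replace {q m d : List Char} {c : Char} {t : List Char} (hq3 : q.length = 3)
    (hm : m ≠ []) (hd : d ≠ []) (hdisj : ∀ ch ∈ q, ch ∉ d)
    (h : ¬ q <+: (c :: t)) : ¬ q <+: (c :: PySem.Chars.replace t m d) := by
  intro hpre
  apply h
  match q, hq3 with
  | [a, b, e], _ =>
    rw [List.cons_prefix_cons] at hpre
    rw [List.cons_prefix_cons]
    refine ⟨hpre.1, ?_⟩
    exact double_prefix_replace hm hd (hdisj b (by simp)) (hdisj e (by simp)) hpre.2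

-- concrete facts about the month table
theorem mt_shape : ∀ p ∈ monthTable, p.1.length = 3 ∧ p.1 ≠ [] ∧ p.2 ≠ [] := by decide

def mtDisjB : Bool :=
  monthTable.all (fun p => monthTable.all (fun q => p.1.all (fun ch => q.2.all (fun c2 => ch != c2))))

theorem mtDisjB_true : mtDisjB = true := rfl

theorem mt_disj : ∀ p ∈ monthTable, ∀ q ∈ monthTable, ∀ ch ∈ p.1, ch ∉ q.2 := by
  have hb := mtDisjB_true
  unfold mtDisjB at hb
  simp only [List.all_eq_true] at hb
  intro p hp q hq ch hch hmem
  have hne := hb p hp q hq ch hch ch hmem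
  simp at hne

set_option maxRecDepth 100000 in
set_option maxHeartbeats 4000000 in
theorem mt_noHits : ∀ i, (hi : i < monthTable.length) →
    (∀ p ∈ monthTable.take i, p.1 ≠ [] ∧ noHitsB p.1 (monthTable[i].1) = true) ∧
    (∀ p ∈ monthTable.drop (i + 1), p.1 ≠ [] ∧ noHitsB p.1 (monthTable[i].2) = true) := by
  decide

theorem foldl_cons_pass :
    ∀ (Q : List (List Char × List Char)), (∀ p ∈ Q, p ∈ monthTable) →
      ∀ (c : Char) (t : List Char), (∀ p ∈ monthTable, ¬ p.1 <+: (c :: t)) →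
        Q.foldl stepR (c :: t) = c :: Q.foldl stepR t := by
  intro Q
  induction Q with
  | nil => intro _ c t _; simp
  | cons p Q' ih =>
    intro hsub c t h
    have hpm : p ∈ monthTable := hsub p (List.mem_cons_self ..)
    obtain ⟨hq3, hne1, hne2⟩ := mt_shape p hpm
    simp only [List.foldl_cons]
    rw [show stepR (c :: t) p = c :: stepR t p from replace_neg p.1 p.2 c t hne1 (h p hpm)]
    refine ih (fun q hq => hsub q (List.mem_cons_of_mem _ hq)) c (stepR t p) ?_
    intro q hq
    exact not_prefix_replace (mt_shape q hq).1 hne1 hne2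
      (fun ch hch => mt_disj q hq p hpm ch hch) (h q hq)

theorem month_step (i : Nat) (hi : i < monthTable.length) (t : List Char) :
    monthTable.foldl stepR (monthTable[i].1 ++ t) =
      monthTable[i].2 ++ monthTable.foldl stepR t := by
  obtain ⟨h1, h2⟩ := mt_noHits i hi
  have hmem : monthTable[i] ∈ monthTable := List.getElem_mem hi
  set P1 := monthTable.take i with hP1
  set P2 := monthTable.drop (i + 1) with hP2
  set mi := monthTable[i] with hmi
  have hmne : mi.1 ≠ [] := (mt_shape mi hmem).2.1
  have hsplit : monthTable = P1 ++ mi :: P2 := by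
    rw [hmi, hP2, hP1, ← List.drop_eq_getElem_cons hi, List.take_append_drop]
  have e2 : ∀ X : List Char, stepR (mi.1 ++ X) mi = mi.2 ++ PySem.Chars.replace X mi.1 mi.2 := by
    intro X
    show PySem.Chars.replace (mi.1 ++ X) mi.1 mi.2 = _
    cases hmc : mi.1 with
    | nil => exact absurd hmc hmne
    | cons mc mt' =>
      rw [List.cons_append,
        replace_pos _ _ _ _ (by simp) (by rw [← List.cons_append]; exact List.prefix_append ..)]
      congr 1
      rw [← List.cons_append, List.drop_left]
  conv_lhs => rw [hsplit]
  conv_rhs => rw [hsplit]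
  rw [List.foldl_append, List.foldl_append, List.foldl_cons, List.foldl_cons]
  rw [foldl_append_pass P1 mi.1 h1 t, e2 (P1.foldl stepR t)]
  rw [foldl_append_pass P2 mi.2 h2 (PySem.Chars.replace (P1.foldl stepR t) mi.1 mi.2)]
  rfl

theorem lookup_mem {k ds : List Char} :
    ∀ (l : List (List Char × List Char)), List.lookup k l = some ds → (k, ds) ∈ l := by
  intro l
  induction l with
  | nil => intro h; simp [List.lookup] at h
  | cons q l' ih =>
    obtain ⟨qk, qv⟩ := q
    intro h
    by_cases hbeq : k = qk
    · subst hbeq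
      simp [List.lookup] at h
      simp [h]
    · have hb : (k == qk) = false := by simp [hbeq]
      simp only [List.lookup, hb] at h
      exact List.mem_cons_of_mem _ (ih h)

theorem lookup_none_not_mem {k : List Char} :
    ∀ (l : List (List Char × List Char)), List.lookup k l = none → ∀ p ∈ l, p.1 ≠ k := by
  intro l
  induction l with
  | nil => intro _ p hp; simp at hp
  | cons q l' ih =>
    obtain ⟨qk, qv⟩ := q
    intro h p hp
    by_cases hbeq : k = qk
    · subst hbeq; simp [List.lookup] at h
    · have hb : (k == qk) = false := by simp [hbeq]
      simp only [List.lookup, hb] at h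
      rcases List.mem_cons.mp hp with rfl | hp'
      · simp only [ne_eq]
        exact fun hh => hbeq hh.symm
      · exact ih h p hp'

theorem mt_foldl_nil : monthTable.foldl stepR [] = [] := by decide

theorem subMonths_nil : subMonths [] = [] := rfl

theorem subMonths_one (c : Char) : subMonths [c] = [c] := rfl

theorem subMonths_two (c1 c2 : Char) : subMonths [c1, c2] = [c1, c2] := rfl

theorem subMonths_cons3 (c1 c2 c3 : Char) (rest : List Char) :
    subMonths (c1 :: c2 :: c3 :: rest) =
      match List.lookup [c1, c2, c3] monthTable with
      | some ds => ds ++ subMonths rest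
      | none => c1 :: subMonths (c2 :: c3 :: rest) := by
  rw [subMonths.eq_def]

theorem fold_eq_subMonths : ∀ (s : List Char), monthTable.foldl stepR s = subMonths s := by
  have key : ∀ (n : Nat) (s : List Char), s.length ≤ n →
      monthTable.foldl stepR s = subMonths s := by
    intro n
    induction n with
    | zero =>
      intro s hs
      have : s = [] := List.eq_nil_of_length_eq_zero (by omega)
      subst this
      rw [mt_foldl_nil, subMonths_nil]
    | succ n ih =>
      intro s hs
      have hshort : ∀ (c : Char) (t : List Char), t.length ≤ 1 →
          ∀ p ∈ monthTable, ¬ p.1 <+: (c :: t) := by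
        intro c t ht p hp hpre
        have h3 := (mt_shape p hp).1
        have := hpre.length_le
        simp [h3] at this
        omega
      match s with
      | [] => rw [mt_foldl_nil, subMonths_nil]
      | [c] =>
        rw [foldl_cons_pass monthTable (fun p hp => hp) c [] (hshort c [] (by simp)),
          mt_foldl_nil, subMonths_one]
      | [c1, c2] =>
        rw [foldl_cons_pass monthTable (fun p hp => hp) c1 [c2] (hshort c1 [c2] (by simp))]
        rw [ih [c2] (by simp at hs ⊢; omega), subMonths_one, subMonths_two]
      | c1 :: c2 :: c3 :: rest =>
        cases hk : List.lookup [c1, c2, c3] monthTable with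
        | some ds =>
          have hmem := lookup_mem monthTable hk
          obtain ⟨i, hi, hgi⟩ := List.mem_iff_getElem.mp hmem
          have h1 : monthTable[i].1 = [c1, c2, c3] := by rw [hgi]
          have h2 : monthTable[i].2 = ds := by rw [hgi]
          conv_rhs => rw [subMonths_cons3, hk]
          rw [show c1 :: c2 :: c3 :: rest = monthTable[i].1 ++ rest from by rw [h1]; rfl]
          rw [month_step i hi rest, h2]
          rw [ih rest (by simp at hs; omega)]
        | none =>
          have hnp : ∀ p ∈ monthTable, ¬ p.1 <+: (c1 :: c2 :: c3 :: rest) := by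
            intro p hp hpre
            have h3 := (mt_shape p hp).1
            have : p.1 = [c1, c2, c3] := by
              have := List.prefix_iff_eq_take.mp hpre
              rw [h3] at this
              simpa using this
            exact lookup_none_not_mem monthTable hk p hp this
          rw [foldl_cons_pass monthTable (fun p hp => hp) c1 (c2 :: c3 :: rest) hnp]
          rw [ih (c2 :: c3 :: rest) (by simp at hs ⊢; omega), subMonths_cons3, hk]
  intro s
  exact key s.length s (le_refl _)

theorem strfold (L : List (String × String)) :
    ∀ (s : String), (L.foldl (fun s p => PySem.Str.replace s p.1 p.2) s).toList =
      (L.map (fun p => (p.1.toList, p.2.toList))).foldl stepR s.toList := by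
  induction L with
  | nil => intro s; simp
  | cons p L' ih =>
    intro s
    simp only [List.foldl_cons, List.map_cons]
    rw [ih (PySem.Str.replace s p.1 p.2)]
    congr 1
    rw [show stepR s.toList (p.1.toList, p.2.toList) =
      PySem.Chars.replace s.toList p.1.toList p.2.toList from rfl]
    exact PySem.Str.toList_replace s p.1 p.2

theorem monthmap : monthPairs.map (fun p => (p.1.toList, p.2.toList)) = monthTable := by decide

theorem date_eq (dt : String) :
    monthPairs.foldl (fun s p => PySem.Str.replace s p.1 p.2) (PySem.Str.lower dt) =
      String.ofList (subMonths (PySem.Str.lower dt).toList) := by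
  have h := strfold monthPairs (PySem.Str.lower dt)
  rw [monthmap, fold_eq_subMonths] at h
  calc monthPairs.foldl (fun s p => PySem.Str.replace s p.1 p.2) (PySem.Str.lower dt)
      = String.ofList (monthPairs.foldl (fun s p => PySem.Str.replace s p.1 p.2)
          (PySem.Str.lower dt)).toList := String.ofList_toList.symm
    _ = String.ofList (subMonths (PySem.Str.lower dt).toList) := by rw [h]

theorem loop_eq (d : PySem.Dict String String) (date : String) :
    ∀ L : List (String × String),
      defLoopA d date L =
        match L.findSome? (fun p =>
            match d.get? p.1 with
            | some v => if v = "?" then none else some (v ++ " " ++ p.2)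
            | none => none) with
        | none => none
        | some c => some (c ++ "\\;" ++ date) := by
  intro L
  induction L with
  | nil => rfl
  | cons p L' ih =>
    obtain ⟨flag, lang⟩ := p
    cases hget : d.get? flag with
    | none =>
      have hc : d.contains flag = false := by
        rw [PySem.Dict.contains_eq_isSome_get?, hget]; rfl
      simp only [defLoopA, hc, Bool.false_eq_true, if_false, List.findSome?_cons, hget]
      exact ih
    | some v =>
      have hc : d.contains flag = true := by
        rw [PySem.Dict.contains_eq_isSome_get?, hget]; rfl
      by_cases hv : v = "?"
      · subst hv
        simp only [defLoopA, hc, if_true, hget, List.findSome?_cons]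
        simpa using ih
      · simp only [defLoopA, hc, if_true, hget, List.findSome?_cons, if_neg hv]

-- ===== VERDICT (by name: the statement is the Claim_ definition above) =====
theorem get_definition_spec : Claim_equal_get_definition := by
  intro fields _dom _pre
  unfold Spec_get_definition get_definition get_definition_alt
  cases h : (PySem.Dict.mk fields).get? "\\dt" with
  | none => rfl
  | some dt =>
    simp only
    rw [loop_eq (PySem.Dict.mk fields)
      (monthPairs.foldl (fun s p => PySem.Str.replace s p.1 p.2) (PySem.Str.lower dt)) defFlagLangs]
    rw [date_eq dt]
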